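-- pv_equiv track=rewrite | github.com/ohwwh/Personal_study | 알고리즘/요기요 코테/유사하노이.py | solution
-- ===== SOURCE A (Python) =====
-- def toString(lst):
--     ret = ""
--     for s in lst:
--         ret += s
--     return ret
--
-- def solution(stack1, stack2, stack3):
-- 	ret = []
-- 	while stack1 or stack2 or stack3:
-- 		if not stack1:
-- 			if not stack2:
-- 				stack3.pop()
-- 				ret.append(str(3))
-- 			elif not stack3:
-- 				stack2.pop()
-- 				ret.append(str(2))
-- 			else:
-- 				if stack2[-1] >= stack3[-1]:
-- 					stack2.pop()
-- 					ret.append(str(2))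
-- 				else:
-- 					stack3.pop()
-- 					ret.append(str(3))
-- 		elif not stack2:
-- 			if not stack1:
-- 				stack3.pop()
-- 				ret.append(str(3))
-- 			elif not stack3:
-- 				stack1.pop()
-- 				ret.append(str(1))
-- 			else:
-- 				if stack1[-1] >= stack3[-1]:
-- 					stack1.pop()
-- 					ret.append(str(1))
-- 				else:
-- 					stack3.pop()
-- 					ret.append(str(3))
-- 		elif not stack3:
-- 			if not stack1:
-- 				stack1.pop()
-- 				ret.append(str(1))
-- 			elif not stack2:
-- 				stack2.pop()
-- 				ret.append(str(2))
-- 			else: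
-- 				if stack1[-1] >= stack2[-1]:
-- 					stack1.pop()
-- 					ret.append(str(1))
-- 				else:
-- 					stack2.pop()
-- 					ret.append(str(2))
-- 		else:
-- 			if stack1[-1] >= stack2[-1] :
-- 				if stack1[-1] >= stack3[-1]:
-- 					stack1.pop()
-- 					ret.append(str(1))
-- 				else:
-- 					stack3.pop()
-- 					ret.append(str(3))
-- 			else:
-- 				if stack2[-1] >= stack3[-1]:
-- 					stack2.pop()
-- 					ret.append(str(2))
-- 				else:
-- 					stack3.pop()
-- 					ret.append(str(3))
-- 	return toString(ret)
-- ===== SOURCE B (Python) =====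
-- def _push(pq, item):
--     # insert item into the ascending list pq, keeping it sorted
--     k = 0
--     while k < len(pq) and pq[k] < item:
--         k += 1
--     pq.insert(k, item)
--
-- def solution(stack1, stack2, stack3):
--     stacks = [stack1, stack2, stack3]
--     pq = []  # priority queue as a sorted list of (-top, index)
--     for i, s in enumerate(stacks):
--         if s:
--             _push(pq, (-s[-1], i))
--     out = []
--     while pq:
--         _, i = pq.pop(0)
--         out.append(str(i + 1))
--         s = stacks[i]
--         s.pop()
--         if s:
--             _push(pq, (-s[-1], i))
--     return ''.join(out)
-- ===== Notes on version B (the rewrite author's own statement) =====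
-- stated objective: alternative
-- what changed: A's 13-branch nested emptiness/comparison tree is replaced by a priority queue: a sorted list of (-top, index) pairs built once and maintained by a single pop-front/ordered-insert loop (the lexicographic key reproduces A's '>= , lower index wins' tie-break).
import Mathlib
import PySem

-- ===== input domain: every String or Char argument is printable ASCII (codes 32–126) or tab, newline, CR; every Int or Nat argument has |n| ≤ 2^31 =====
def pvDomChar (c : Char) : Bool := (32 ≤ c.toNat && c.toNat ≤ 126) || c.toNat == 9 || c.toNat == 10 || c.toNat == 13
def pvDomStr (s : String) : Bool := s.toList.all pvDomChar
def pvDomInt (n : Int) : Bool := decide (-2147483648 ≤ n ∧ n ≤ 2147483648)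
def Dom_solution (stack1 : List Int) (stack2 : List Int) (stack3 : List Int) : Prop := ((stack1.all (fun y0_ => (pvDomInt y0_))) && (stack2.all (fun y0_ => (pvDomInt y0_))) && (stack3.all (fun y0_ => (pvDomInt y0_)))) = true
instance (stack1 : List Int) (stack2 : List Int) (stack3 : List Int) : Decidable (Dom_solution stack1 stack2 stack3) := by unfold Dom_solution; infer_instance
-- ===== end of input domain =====

-- B replaces A's 13-branch comparison tree by a priority queue (a sorted list of (-top, index))
-- popped from the front; same return value, and both versions consume (empty) all three stks.

-- ===== PORT A =====

-- stack[-1]; in both ports it is only evaluated on a nonempty stack, where pyGet? returns some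
def pyTop (s : List Int) : Int := (PySem.List.pyGet? s (-1)).getD 0

-- A's helper `toString`: ret = ""; for s in lst: ret += s  (on code points: Lean's String.append is kernel-opaque)
def toStringPy (lst : List String) : String :=
  String.ofList (lst.foldl (fun ret s => ret ++ s.toList) [])

-- the while loop of A; stack.pop() discarding the result = dropLast (never reached on an empty stack)
def loopA (s1 s2 s3 : List Int) (ret : List String) : List String :=
  if hw : s1 ≠ [] ∨ s2 ≠ [] ∨ s3 ≠ [] then        -- while stack1 or stack2 or stack3
    if h1 : s1 = [] then
      if h2 : s2 = [] then
        loopA s1 s2 s3.dropLast (ret ++ [PySem.Int.toStr 3])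
      else if h3 : s3 = [] then
        loopA s1 s2.dropLast s3 (ret ++ [PySem.Int.toStr 2])
      else
        if pyTop s2 ≥ pyTop s3 then loopA s1 s2.dropLast s3 (ret ++ [PySem.Int.toStr 2])
        else loopA s1 s2 s3.dropLast (ret ++ [PySem.Int.toStr 3])
    else if h2 : s2 = [] then
      if h1b : s1 = [] then                        -- dead branch of A, transliterated
        loopA s1 s2 s3.dropLast (ret ++ [PySem.Int.toStr 3])
      else if h3 : s3 = [] then
        loopA s1.dropLast s2 s3 (ret ++ [PySem.Int.toStr 1])
      else
        if pyTop s1 ≥ pyTop s3 then loopA s1.dropLast s2 s3 (ret ++ [PySem.Int.toStr 1])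
        else loopA s1 s2 s3.dropLast (ret ++ [PySem.Int.toStr 3])
    else if h3 : s3 = [] then
      if h1b : s1 = [] then                        -- dead branch of A, transliterated
        loopA s1.dropLast s2 s3 (ret ++ [PySem.Int.toStr 1])
      else if h2b : s2 = [] then                   -- dead branch of A, transliterated
        loopA s1 s2.dropLast s3 (ret ++ [PySem.Int.toStr 2])
      else
        if pyTop s1 ≥ pyTop s2 then loopA s1.dropLast s2 s3 (ret ++ [PySem.Int.toStr 1])
        else loopA s1 s2.dropLast s3 (ret ++ [PySem.Int.toStr 2])
    else
      if pyTop s1 ≥ pyTop s2 then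
        if pyTop s1 ≥ pyTop s3 then loopA s1.dropLast s2 s3 (ret ++ [PySem.Int.toStr 1])
        else loopA s1 s2 s3.dropLast (ret ++ [PySem.Int.toStr 3])
      else
        if pyTop s2 ≥ pyTop s3 then loopA s1 s2.dropLast s3 (ret ++ [PySem.Int.toStr 2])
        else loopA s1 s2 s3.dropLast (ret ++ [PySem.Int.toStr 3])
  else ret
termination_by s1.length + s2.length + s3.length
decreasing_by
  all_goals (simp_all [List.length_dropLast, ← List.length_eq_zero_iff] <;> omega)

def solution (stack1 : List Int) (stack2 : List Int) (stack3 : List Int) : String :=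
  toStringPy (loopA stack1 stack2 stack3 [])

-- ===== PORT B =====

-- B's `_push`: linear scan for the first element not < item, insert there (pq stays sorted);
-- the Python tuple comparison pq[k] < item is written out as the lexicographic test
def pushB (pq : List (Int × Int)) (item : Int × Int) : List (Int × Int) :=
  match pq with
  | [] => [item]
  | x :: rest =>
      if x.1 < item.1 ∨ (x.1 = item.1 ∧ x.2 < item.2) then x :: pushB rest item
      else item :: x :: rest

-- cited by loopB's decreasing_by
theorem pushB_length (pq : List (Int × Int)) (item : Int × Int) :
    (pushB pq item).length = pq.length + 1 := by
  induction pq with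
  | nil => rfl
  | cons x rest ih => simp only [pushB]; split <;> simp [ih]

-- cited by loopB's decreasing_by
theorem sum_map_length_set_le (stks : List (List Int)) (n : Nat) (t : List Int)
    (h : t.length ≤ (stks.getD n []).length) :
    ((stks.set n t).map List.length).sum ≤ (stks.map List.length).sum := by
  induction stks generalizing n with
  | nil => simp
  | cons s rest ih =>
      cases n with
      | zero => simp_all
      | succ m => simpa using Nat.add_le_add_left (ih m (by simpa using h)) s.length

-- cited by loopB's decreasing_by
theorem sum_map_length_set_lt (stks : List (List Int)) (n : Nat) (t : List Int)
    (h : t.length < (stks.getD n []).length) :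
    ((stks.set n t).map List.length).sum < (stks.map List.length).sum := by
  induction stks generalizing n with
  | nil => simp at h
  | cons s rest ih =>
      cases n with
      | zero => simp_all
      | succ m => simpa using Nat.add_lt_add_left (ih m (by simpa using h)) s.length

-- B's initialisation loop: for i, s in enumerate(stks): if s: _push(pq, (-s[-1], i))
def initPQ (stks : List (List Int)) : List (Int × Int) :=
  (PySem.List.enumerate stks).foldl
    (fun pq p => if p.2 ≠ [] then pushB pq (-(pyTop p.2), p.1) else pq) []

-- B's while loop; the index i stored in the queue comes from enumerate, hence 0 ≤ i < len stks
-- and .toNat is exact; stks.set n … is s.pop() performed on the list inside the stacks list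
def loopB (stks : List (List Int)) (pq : List (Int × Int)) (out : List String) : List String :=
  match pq with
  | [] => out
  | (_, i) :: rest =>
      -- i.toNat is exact: the index i stored in the queue comes from enumerate, so 0 ≤ i < len stks;
      -- stks.getD i.toNat [] is s = stks[i], and stks.set … s.dropLast is s.pop() inside the stacks list
      if h : (stks.getD i.toNat []).dropLast = [] then
        loopB (stks.set i.toNat (stks.getD i.toNat []).dropLast) rest
          (out ++ [PySem.Int.toStr (i + 1)])
      else
        loopB (stks.set i.toNat (stks.getD i.toNat []).dropLast)
          (pushB rest (-(pyTop (stks.getD i.toNat []).dropLast), i))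
          (out ++ [PySem.Int.toStr (i + 1)])
termination_by (stks.map List.length).sum + pq.length
decreasing_by
  · have := sum_map_length_set_le stks i.toNat (stks.getD i.toNat []).dropLast
      (by simp only [List.length_dropLast]; omega)
    simp only [List.length_cons]; omega
  · have hne : stks.getD i.toNat [] ≠ [] := by
      intro hempty
      rw [hempty] at h
      simp at h
    have hlen : (stks.getD i.toNat []).length ≠ 0 := by
      simpa [List.length_eq_zero_iff] using hne
    have hlt : (stks.getD i.toNat []).dropLast.length < (stks.getD i.toNat []).length := by
      simp only [List.length_dropLast]; omega
    have := sum_map_length_set_lt stks i.toNat _ hlt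
    simp only [pushB_length, List.length_cons]; omega

def solution_alt (stack1 : List Int) (stack2 : List Int) (stack3 : List Int) : String :=
  PySem.Str.join "" (loopB [stack1, stack2, stack3] (initPQ [stack1, stack2, stack3]) [])

-- ===== PRECONDITION & SPEC =====
def Spec_solution (stack1 : List Int) (stack2 : List Int) (stack3 : List Int) (out : String) : Prop := out = solution_alt stack1 stack2 stack3
instance (stack1 : List Int) (stack2 : List Int) (stack3 : List Int) (out : String) : Decidable (Spec_solution stack1 stack2 stack3 out) := by unfold Spec_solution; infer_instance

-- ===== CLAIM (what is proved, stated in full; the proofs are below) =====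
def Claim_equal_solution : Prop := ∀ (stack1 : List Int) (stack2 : List Int) (stack3 : List Int), Dom_solution stack1 stack2 stack3 → Spec_solution stack1 stack2 stack3 (solution stack1 stack2 stack3)

-- ===== LEMMAS AND PROOFS =====

@[simp] theorem push_nil (y : Int × Int) : pushB [] y = [y] := rfl

theorem push_cons (x y : Int × Int) (r : List (Int × Int)) :
    pushB (x :: r) y =
      if x.1 < y.1 ∨ (x.1 = y.1 ∧ x.2 < y.2) then x :: pushB r y else y :: x :: r := rfl

theorem loopB_nil (stks : List (List Int)) (out : List String) : loopB stks [] out = out := by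
  rw [loopB]

theorem loopB_cons (stks : List (List Int)) (k i : Int) (rest : List (Int × Int))
    (out : List String) :
    loopB stks ((k, i) :: rest) out =
      if (stks.getD i.toNat []).dropLast = [] then
        loopB (stks.set i.toNat (stks.getD i.toNat []).dropLast) rest
          (out ++ [PySem.Int.toStr (i + 1)])
      else
        loopB (stks.set i.toNat (stks.getD i.toNat []).dropLast)
          (pushB rest (-(pyTop (stks.getD i.toNat []).dropLast), i))
          (out ++ [PySem.Int.toStr (i + 1)]) := by
  rw [loopB]
  split_ifs <;> rfl

theorem loop_eq : ∀ (n : Nat) (a b c : List Int) (out : List String),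
    a.length + b.length + c.length ≤ n →
    loopA a b c out = loopB [a, b, c] (initPQ [a, b, c]) out := by
  intro n
  induction n with
  | zero =>
    intro a b c out hlen
    obtain ⟨ha, hb, hc⟩ : a = [] ∧ b = [] ∧ c = [] := by
      refine ⟨?_, ?_, ?_⟩ <;> (rw [← List.length_eq_zero_iff]; omega)
    subst ha; subst hb; subst hc
    rw [loopA.eq_def, show initPQ [[], [], []] = [] from rfl, loopB_nil]
    simp
  | succ m IH =>
    intro a b c out hlen
    by_cases ha : a = [] <;> by_cases hb : b = [] <;> by_cases hc : c = []
    · -- all empty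
      subst ha; subst hb; subst hc
      rw [loopA.eq_def, show initPQ [[], [], []] = [] from rfl, loopB_nil]
      simp
    · -- only c nonempty
      subst ha; subst hb
      have hlc : c.length ≠ 0 := by simpa [List.length_eq_zero_iff] using hc
      have hpq : initPQ [[], [], c] = [(-pyTop c, 2)] := by
        simp [initPQ, PySem.List.enumerate_cons, PySem.List.enumerate_nil, hc]
      rw [hpq, loopB_cons]
      norm_num [List.getD]
      rw [loopA.eq_def]
      rw [IH [] [] c.dropLast (out ++ [PySem.Int.toStr 3])
        (by simp [List.length_dropLast]; omega)]
      by_cases hc' : c.dropLast = [] <;>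
        simp [hc, hc', initPQ, PySem.List.enumerate_cons, PySem.List.enumerate_nil,
          push_cons, loopB_nil]
      all_goals ((try split_ifs) <;> try simp [push_cons])
      all_goals ((try split_ifs) <;> try simp [push_cons])
      all_goals ((try split_ifs) <;> try first | rfl | omega | (exfalso; omega))
    · -- only b nonempty
      subst ha; subst hc
      have hlb : b.length ≠ 0 := by simpa [List.length_eq_zero_iff] using hb
      have hpq : initPQ [[], b, []] = [(-pyTop b, 1)] := by
        simp [initPQ, PySem.List.enumerate_cons, PySem.List.enumerate_nil, hb]
      rw [hpq, loopB_cons]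
      norm_num [List.getD]
      rw [loopA.eq_def]
      rw [IH [] b.dropLast [] (out ++ [PySem.Int.toStr 2])
        (by simp [List.length_dropLast]; omega)]
      by_cases hb' : b.dropLast = [] <;>
        simp [hb, hb', initPQ, PySem.List.enumerate_cons, PySem.List.enumerate_nil,
          push_cons, loopB_nil]
      all_goals ((try split_ifs) <;> try simp [push_cons])
      all_goals ((try split_ifs) <;> try simp [push_cons])
      all_goals ((try split_ifs) <;> try first | rfl | omega | (exfalso; omega))
    · -- b, c nonempty
      subst ha
      have hlb : b.length ≠ 0 := by simpa [List.length_eq_zero_iff] using hb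
      have hlc : c.length ≠ 0 := by simpa [List.length_eq_zero_iff] using hc
      rcases (by omega : pyTop c ≤ pyTop b ∨ pyTop b < pyTop c) with hbc | hbc
      · -- top of stack2 wins (ties included)
        have hpq : initPQ [[], b, c] = [(-pyTop b, 1), (-pyTop c, 2)] := by
          simp [initPQ, PySem.List.enumerate_cons, PySem.List.enumerate_nil, hb, hc, push_cons]
          all_goals ((try split_ifs) <;> try simp [push_cons])
          all_goals ((try split_ifs) <;> try simp [push_cons])
          all_goals ((try split_ifs) <;> try first | rfl | omega | (exfalso; omega))
        rw [hpq, loopB_cons]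
        norm_num [List.getD]
        rw [loopA.eq_def]
        rw [IH [] b.dropLast c (out ++ [PySem.Int.toStr 2])
          (by simp [List.length_dropLast]; omega)]
        by_cases hb' : b.dropLast = [] <;>
          simp [hb, hc, hb', ge_iff_le, hbc, initPQ, PySem.List.enumerate_cons,
            PySem.List.enumerate_nil, push_cons, loopB_nil]
        all_goals ((try split_ifs) <;> try simp [push_cons])
        all_goals ((try split_ifs) <;> try simp [push_cons])
        all_goals ((try split_ifs) <;> try first | rfl | omega | (exfalso; omega))
      · -- top of stack3 strictly larger
        have hpq : initPQ [[], b, c] = [(-pyTop c, 2), (-pyTop b, 1)] := by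
          simp [initPQ, PySem.List.enumerate_cons, PySem.List.enumerate_nil, hb, hc, push_cons]
          all_goals ((try split_ifs) <;> try simp [push_cons])
          all_goals ((try split_ifs) <;> try simp [push_cons])
          all_goals ((try split_ifs) <;> try first | rfl | omega | (exfalso; omega))
        rw [hpq, loopB_cons]
        norm_num [List.getD]
        rw [loopA.eq_def]
        rw [IH [] b c.dropLast (out ++ [PySem.Int.toStr 3])
          (by simp [List.length_dropLast]; omega)]
        by_cases hc' : c.dropLast = [] <;>
          simp [hb, hc, hc', ge_iff_le, hbc.not_ge, initPQ, PySem.List.enumerate_cons,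
            PySem.List.enumerate_nil, push_cons, loopB_nil]
        all_goals ((try split_ifs) <;> try simp [push_cons])
        all_goals ((try split_ifs) <;> try simp [push_cons])
        all_goals ((try split_ifs) <;> try first | rfl | omega | (exfalso; omega))
    · -- only a nonempty
      subst hb; subst hc
      have hlc : a.length ≠ 0 := by simpa [List.length_eq_zero_iff] using ha
      have hpq : initPQ [a, [], []] = [(-pyTop a, 0)] := by
        simp [initPQ, PySem.List.enumerate_cons, PySem.List.enumerate_nil, ha]
      rw [hpq, loopB_cons]
      norm_num [List.getD]
      rw [loopA.eq_def]
      simp only [ha, or_true, true_or, dite_true, dite_false, ne_eq, not_false_eq_true,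
        not_true_eq_false, dite_eq_ite, if_true, if_false]
      rw [IH a.dropLast [] [] (out ++ [PySem.Int.toStr 1])
        (by simp [List.length_dropLast]; omega)]
      by_cases ha' : a.dropLast = []
      · simp [ha', loopB_nil, show initPQ [[], [], []] = [] from rfl]
      · simp only [ha', if_false, if_neg ha']
        congr 1
        simp [initPQ, PySem.List.enumerate_cons, PySem.List.enumerate_nil, ha']
    · -- a, c nonempty
      subst hb
      have hla : a.length ≠ 0 := by simpa [List.length_eq_zero_iff] using ha
      have hlc : c.length ≠ 0 := by simpa [List.length_eq_zero_iff] using hc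
      rcases (by omega : pyTop c ≤ pyTop a ∨ pyTop a < pyTop c) with hac | hac
      · have hpq : initPQ [a, [], c] = [(-pyTop a, 0), (-pyTop c, 2)] := by
          simp [initPQ, PySem.List.enumerate_cons, PySem.List.enumerate_nil, ha, hc, push_cons]
          all_goals ((try split_ifs) <;> try simp [push_cons])
          all_goals ((try split_ifs) <;> try simp [push_cons])
          all_goals ((try split_ifs) <;> try first | rfl | omega | (exfalso; omega))
        rw [hpq, loopB_cons]
        norm_num [List.getD]
        rw [loopA.eq_def]
        rw [IH a.dropLast [] c (out ++ [PySem.Int.toStr 1])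
          (by simp [List.length_dropLast]; omega)]
        by_cases ha' : a.dropLast = [] <;>
          simp [ha, hc, ha', ge_iff_le, hac, initPQ, PySem.List.enumerate_cons,
            PySem.List.enumerate_nil, push_cons, loopB_nil]
        all_goals ((try split_ifs) <;> try simp [push_cons])
        all_goals ((try split_ifs) <;> try simp [push_cons])
        all_goals ((try split_ifs) <;> try first | rfl | omega | (exfalso; omega))
      · have hpq : initPQ [a, [], c] = [(-pyTop c, 2), (-pyTop a, 0)] := by
          simp [initPQ, PySem.List.enumerate_cons, PySem.List.enumerate_nil, ha, hc, push_cons]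
          all_goals ((try split_ifs) <;> try simp [push_cons])
          all_goals ((try split_ifs) <;> try simp [push_cons])
          all_goals ((try split_ifs) <;> try first | rfl | omega | (exfalso; omega))
        rw [hpq, loopB_cons]
        norm_num [List.getD]
        rw [loopA.eq_def]
        rw [IH a [] c.dropLast (out ++ [PySem.Int.toStr 3])
          (by simp [List.length_dropLast]; omega)]
        by_cases hc' : c.dropLast = [] <;>
          simp [ha, hc, hc', ge_iff_le, hac.not_ge, initPQ, PySem.List.enumerate_cons,
            PySem.List.enumerate_nil, push_cons, loopB_nil]
        all_goals ((try split_ifs) <;> try simp [push_cons])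
        all_goals ((try split_ifs) <;> try simp [push_cons])
        all_goals ((try split_ifs) <;> try first | rfl | omega | (exfalso; omega))
    · -- a, b nonempty
      subst hc
      have hla : a.length ≠ 0 := by simpa [List.length_eq_zero_iff] using ha
      have hlb : b.length ≠ 0 := by simpa [List.length_eq_zero_iff] using hb
      rcases (by omega : pyTop b ≤ pyTop a ∨ pyTop a < pyTop b) with hab | hab
      · have hpq : initPQ [a, b, []] = [(-pyTop a, 0), (-pyTop b, 1)] := by
          simp [initPQ, PySem.List.enumerate_cons, PySem.List.enumerate_nil, ha, hb, push_cons]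
          all_goals ((try split_ifs) <;> try simp [push_cons])
          all_goals ((try split_ifs) <;> try simp [push_cons])
          all_goals ((try split_ifs) <;> try first | rfl | omega | (exfalso; omega))
        rw [hpq, loopB_cons]
        norm_num [List.getD]
        rw [loopA.eq_def]
        rw [IH a.dropLast b [] (out ++ [PySem.Int.toStr 1])
          (by simp [List.length_dropLast]; omega)]
        by_cases ha' : a.dropLast = [] <;>
          simp [ha, hb, ha', ge_iff_le, hab, initPQ, PySem.List.enumerate_cons,
            PySem.List.enumerate_nil, push_cons, loopB_nil]
        all_goals ((try split_ifs) <;> try simp [push_cons])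
        all_goals ((try split_ifs) <;> try simp [push_cons])
        all_goals ((try split_ifs) <;> try first | rfl | omega | (exfalso; omega))
      · have hpq : initPQ [a, b, []] = [(-pyTop b, 1), (-pyTop a, 0)] := by
          simp [initPQ, PySem.List.enumerate_cons, PySem.List.enumerate_nil, ha, hb, push_cons]
          all_goals ((try split_ifs) <;> try simp [push_cons])
          all_goals ((try split_ifs) <;> try simp [push_cons])
          all_goals ((try split_ifs) <;> try first | rfl | omega | (exfalso; omega))
        rw [hpq, loopB_cons]
        norm_num [List.getD]
        rw [loopA.eq_def]
        rw [IH a b.dropLast [] (out ++ [PySem.Int.toStr 2])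
          (by simp [List.length_dropLast]; omega)]
        by_cases hb' : b.dropLast = [] <;>
          simp [ha, hb, hb', ge_iff_le, hab.not_ge, initPQ, PySem.List.enumerate_cons,
            PySem.List.enumerate_nil, push_cons, loopB_nil]
        all_goals ((try split_ifs) <;> try simp [push_cons])
        all_goals ((try split_ifs) <;> try simp [push_cons])
        all_goals ((try split_ifs) <;> try first | rfl | omega | (exfalso; omega))
    · -- all three nonempty
      have hla : a.length ≠ 0 := by simpa [List.length_eq_zero_iff] using ha
      have hlb : b.length ≠ 0 := by simpa [List.length_eq_zero_iff] using hb
      have hlc : c.length ≠ 0 := by simpa [List.length_eq_zero_iff] using hc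
      rcases (by omega : pyTop b ≤ pyTop a ∨ pyTop a < pyTop b) with hab | hab
      · rcases (by omega : pyTop c ≤ pyTop a ∨ pyTop a < pyTop c) with hac | hac
        · -- stack1 has the largest top (ties to the lowest index)
          have hpq : initPQ [a, b, c] = (-pyTop a, 0) :: pushB [(-pyTop b, 1)] (-pyTop c, 2) := by
            simp [initPQ, PySem.List.enumerate_cons, PySem.List.enumerate_nil, ha, hb, hc, push_cons]
            all_goals ((try split_ifs) <;> try simp [push_cons])
            all_goals ((try split_ifs) <;> try simp [push_cons])
            all_goals ((try split_ifs) <;> try first | rfl | omega | (exfalso; omega))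
          rw [hpq, loopB_cons]
          norm_num [List.getD]
          rw [loopA.eq_def]
          rw [IH a.dropLast b c (out ++ [PySem.Int.toStr 1])
            (by simp [List.length_dropLast]; omega)]
          by_cases ha' : a.dropLast = [] <;>
            simp [ha, hb, hc, ha', ge_iff_le, hab, hac, initPQ, PySem.List.enumerate_cons,
              PySem.List.enumerate_nil, push_cons, loopB_nil]
          all_goals ((try split_ifs) <;> try simp [push_cons])
          all_goals ((try split_ifs) <;> try simp [push_cons])
          all_goals ((try split_ifs) <;> try first | rfl | omega | (exfalso; omega))
        · -- stack3 strictly largest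
          have hpq : initPQ [a, b, c] = [(-pyTop c, 2), (-pyTop a, 0), (-pyTop b, 1)] := by
            simp [initPQ, PySem.List.enumerate_cons, PySem.List.enumerate_nil, ha, hb, hc, push_cons]
            all_goals ((try split_ifs) <;> try simp [push_cons])
            all_goals ((try split_ifs) <;> try simp [push_cons])
            all_goals ((try split_ifs) <;> try first | rfl | omega | (exfalso; omega))
          rw [hpq, loopB_cons]
          norm_num [List.getD]
          rw [loopA.eq_def]
          rw [IH a b c.dropLast (out ++ [PySem.Int.toStr 3])
            (by simp [List.length_dropLast]; omega)]
          by_cases hc' : c.dropLast = [] <;>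
            simp [ha, hb, hc, hc', ge_iff_le, hab, hac.not_ge, initPQ, PySem.List.enumerate_cons,
              PySem.List.enumerate_nil, push_cons, loopB_nil]
          all_goals ((try split_ifs) <;> try simp [push_cons])
          all_goals ((try split_ifs) <;> try simp [push_cons])
          all_goals ((try split_ifs) <;> try first | rfl | omega | (exfalso; omega))
      · rcases (by omega : pyTop c ≤ pyTop b ∨ pyTop b < pyTop c) with hbc | hbc
        · -- stack2 wins (ties with stack3 go to stack2)
          have hpq : initPQ [a, b, c] = (-pyTop b, 1) :: pushB [(-pyTop a, 0)] (-pyTop c, 2) := by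
            simp [initPQ, PySem.List.enumerate_cons, PySem.List.enumerate_nil, ha, hb, hc, push_cons]
            all_goals ((try split_ifs) <;> try simp [push_cons])
            all_goals ((try split_ifs) <;> try simp [push_cons])
            all_goals ((try split_ifs) <;> try first | rfl | omega | (exfalso; omega))
          rw [hpq, loopB_cons]
          norm_num [List.getD]
          rw [loopA.eq_def]
          rw [IH a b.dropLast c (out ++ [PySem.Int.toStr 2])
            (by simp [List.length_dropLast]; omega)]
          by_cases hb' : b.dropLast = [] <;>
            simp [ha, hb, hc, hb', ge_iff_le, hab.not_ge, hbc, initPQ, PySem.List.enumerate_cons,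
              PySem.List.enumerate_nil, push_cons, loopB_nil]
          all_goals ((try split_ifs) <;> try simp [push_cons])
          all_goals ((try split_ifs) <;> try simp [push_cons])
          all_goals ((try split_ifs) <;> try first | rfl | omega | (exfalso; omega))
        · -- stack3 strictly largest
          have hpq : initPQ [a, b, c] = [(-pyTop c, 2), (-pyTop b, 1), (-pyTop a, 0)] := by
            simp [initPQ, PySem.List.enumerate_cons, PySem.List.enumerate_nil, ha, hb, hc, push_cons]
            all_goals ((try split_ifs) <;> try simp [push_cons])
            all_goals ((try split_ifs) <;> try simp [push_cons])
            all_goals ((try split_ifs) <;> try first | rfl | omega | (exfalso; omega))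
          rw [hpq, loopB_cons]
          norm_num [List.getD]
          rw [loopA.eq_def]
          rw [IH a b c.dropLast (out ++ [PySem.Int.toStr 3])
            (by simp [List.length_dropLast]; omega)]
          by_cases hc' : c.dropLast = [] <;>
            simp [ha, hb, hc, hc', ge_iff_le, hab.not_ge, hbc.not_ge, initPQ, PySem.List.enumerate_cons,
              PySem.List.enumerate_nil, push_cons, loopB_nil]
          all_goals ((try split_ifs) <;> try simp [push_cons])
          all_goals ((try split_ifs) <;> try simp [push_cons])
          all_goals ((try split_ifs) <;> try first | rfl | omega | (exfalso; omega))

theorem join_empty_sep (ls : List (List Char)) : PySem.Chars.join [] ls = ls.flatten := by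
  induction ls with
  | nil => simp [PySem.Chars.join_nil]
  | cons p rest ih =>
    cases rest with
    | nil => simp [PySem.Chars.join_singleton]
    | cons q r => rw [PySem.Chars.join_cons_cons]; simp_all

theorem foldl_concat (l : List String) (acc : List Char) :
    l.foldl (fun ret s => ret ++ s.toList) acc = acc ++ (l.map String.toList).flatten := by
  induction l generalizing acc with
  | nil => simp
  | cons x xs ih => simp [ih, List.append_assoc]

theorem toStringPy_eq_join (l : List String) : toStringPy l = PySem.Str.join "" l := by
  unfold toStringPy PySem.Str.join
  rw [show ("" : String).toList = ([] : List Char) from rfl, join_empty_sep, foldl_concat]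
  simp

-- ===== VERDICT (by name: the statement is the Claim_ definition above) =====
theorem solution_spec : Claim_equal_solution := by
  intro s1 s2 s3 _
  unfold Spec_solution solution solution_alt
  rw [loop_eq (s1.length + s2.length + s3.length) s1 s2 s3 [] le_rfl, toStringPy_eq_join]
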